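/- GENERATED by farm/mkstatement.py from design/units.tsv (unit `vorbis_decode_initial.COMPOSITION`) and the Specs of Vorbis/Spec/*.lean — do not edit.
   THE STATEMENT of the proof unit `vorbis_decode_initial.COMPOSITION`: the function `vorbis_decode_initial` (159 instructions) satisfies its contract,
   GIVEN THE STATEMENTS OF ITS 9 SEGMENTS (`Vorbis.Spec.vorbis_decode_initial.Seg<k> Lay μ u₀`: what the unit `vorbis_decode_initial.<k>` proves).
   No machine code is walked: `ReachVia.trans` along the segments (the exit assertion of a segment is the entry assertion of
   its successor), an induction on the loop measures. What the names mean: Vorbis/Spec/Basic.lean. The theorem to prove: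
   `theorem vorbis_decode_initial_COMPOSITION_ok : Vorbis.Spec.vorbis_decode_initial_COMPOSITION.Statement`. -/
import Vorbis.Spec.DecodeInitial
import Vorbis.Spec.Top
namespace Vorbis.Spec.vorbis_decode_initial_COMPOSITION
open X86 X86.User Asan

/-- The statement of unit `vorbis_decode_initial.COMPOSITION`. -/
def Statement : Prop :=
  ∀ (Lay : Layout) (_hLay : Lay.hi = 0x1000000) (μ : Microarch) (_hμ : UserX.MicroOK μ) (u₀ : State)
    (_h_vorbis_decode_initial_1 : Vorbis.Spec.vorbis_decode_initial.Seg1 Lay μ u₀)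
    (_h_vorbis_decode_initial_2 : Vorbis.Spec.vorbis_decode_initial.Seg2 Lay μ u₀)
    (_h_vorbis_decode_initial_3 : Vorbis.Spec.vorbis_decode_initial.Seg3 Lay μ u₀)
    (_h_vorbis_decode_initial_4 : Vorbis.Spec.vorbis_decode_initial.Seg4 Lay μ u₀)
    (_h_vorbis_decode_initial_5 : Vorbis.Spec.vorbis_decode_initial.Seg5 Lay μ u₀)
    (_h_vorbis_decode_initial_6 : Vorbis.Spec.vorbis_decode_initial.Seg6 Lay μ u₀)
    (_h_vorbis_decode_initial_7 : Vorbis.Spec.vorbis_decode_initial.Seg7 Lay μ u₀)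
    (_h_vorbis_decode_initial_8 : Vorbis.Spec.vorbis_decode_initial.Seg8 Lay μ u₀)
    (_h_vorbis_decode_initial_9 : Vorbis.Spec.vorbis_decode_initial.Seg9 Lay μ u₀),
    ∀ (others : List Obj) (frames : List (Nat × FrameLayout)) (len : Nat) (A : Arena) (stored room : Int) (ysz : Nat → Nat), Calls Lay μ Vorbis.WayInv (Vorbis.conv u₀) Vorbis.L.vorbis_decode_initial.entry (Vorbis.Spec.vorbis_decode_initial.spec others frames len A stored room ysz)

end Vorbis.Spec.vorbis_decode_initial_COMPOSITION
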